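-- pv_equiv track=rewrite | github.com/seongho-joo/Algorithm | src/main/java/Stack/prg159994/__init__.py | solution
-- ===== SOURCE A (Python) =====
-- def solution(cards1, cards2, goal):
--     answer = []
--
--     for i in range(len(goal)):
--         if len(cards1) > 0 and cards1[0] == goal[i]:
--             answer.append(cards1.pop(0))
--         elif len(cards2) > 0 and cards2[0] == goal[i]:
--             answer.append(cards2.pop(0))
--
--         if goal == answer:
--             return 'Yes'
--
--     return 'No'
-- ===== SOURCE B (Python) =====
-- def solution(cards1, cards2, goal):
--     i = j = 0
--     for g in goal:
--         if i < len(cards1) and cards1[i] == g: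
--             i += 1
--         elif j < len(cards2) and cards2[j] == g:
--             j += 1
--         else:
--             return 'No'
--     return 'Yes'
-- ===== Notes on version B (the rewrite author's own statement) =====
-- stated objective: faster
-- what changed: Replaces A's per-step pop(0) (O(n) shifts) and full goal==answer list comparison each iteration with a single two-pointer pass over goal that never copies or mutates the lists.
-- intended difference: On goal = [] A returns 'No' (its loop, which contains the only return 'Yes', never runs) while B returns 'Yes', the intended value since the empty sequence is trivially formable from the two queues. — e.g. on solution([], [], []): A returns "No", B returns "Yes"
import Mathlib
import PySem

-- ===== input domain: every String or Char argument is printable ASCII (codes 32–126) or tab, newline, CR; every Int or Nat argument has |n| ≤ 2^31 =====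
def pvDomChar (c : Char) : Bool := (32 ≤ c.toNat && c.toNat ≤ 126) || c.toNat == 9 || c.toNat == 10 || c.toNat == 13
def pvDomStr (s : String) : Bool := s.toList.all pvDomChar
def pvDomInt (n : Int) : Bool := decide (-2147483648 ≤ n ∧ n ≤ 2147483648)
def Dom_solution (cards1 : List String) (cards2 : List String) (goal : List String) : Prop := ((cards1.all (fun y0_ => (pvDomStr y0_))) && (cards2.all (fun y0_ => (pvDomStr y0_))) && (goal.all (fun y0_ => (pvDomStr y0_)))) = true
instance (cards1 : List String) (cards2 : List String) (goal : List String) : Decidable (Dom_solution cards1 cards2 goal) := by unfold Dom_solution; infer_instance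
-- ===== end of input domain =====

-- B replaces A's pop(0)/full-list-compare loop by a two-pointer single pass (objective: faster).
-- A mutates cards1/cards2 in place via pop(0); the equivalence proved here is about the return value only.

-- ===== PORT A =====
-- one loop iteration's state update; 'cards.pop(0)' under the guard 'len(cards) > 0' is exactly
-- head/tail, ported as such (exact here since the guard ensures the list is nonempty)
def solutionGo (goal : List String) : List Int → List String → List String → List String → String
  | [], _, _, _ => "No"
  | i :: rest, c1, c2, ans =>
      let st :=
        if c1.length > 0 ∧ PySem.List.pyGet? c1 0 = PySem.List.pyGet? goal i then
          (c1.tail, c2, ans ++ [(PySem.List.pyGet? c1 0).getD ""])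
        else if c2.length > 0 ∧ PySem.List.pyGet? c2 0 = PySem.List.pyGet? goal i then
          (c1, c2.tail, ans ++ [(PySem.List.pyGet? c2 0).getD ""])
        else (c1, c2, ans)
      if goal = st.2.2 then "Yes" else solutionGo goal rest st.1 st.2.1 st.2.2

def solution (cards1 : List String) (cards2 : List String) (goal : List String) : String :=
  solutionGo goal (PySem.List.pyRange 0 goal.length 1) cards1 cards2 []

-- ===== PORT B =====
def solutionAltGo (cards1 cards2 : List String) : List String → Int → Int → String
  | [], _, _ => "Yes"
  | g :: gs, i, j =>
      if i < (cards1.length : Int) ∧ PySem.List.pyGet? cards1 i = some g then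
        solutionAltGo cards1 cards2 gs (i + 1) j
      else if j < (cards2.length : Int) ∧ PySem.List.pyGet? cards2 j = some g then
        solutionAltGo cards1 cards2 gs i (j + 1)
      else "No"

def solution_alt (cards1 : List String) (cards2 : List String) (goal : List String) : String :=
  solutionAltGo cards1 cards2 goal 0 0

-- ===== PRECONDITION & SPEC =====
-- On goal = [] A returns 'No' (the loop body holding the only 'return "Yes"' never runs), while B
-- returns 'Yes', which is the intended value: the empty sequence is trivially formable from the queues.
def D_solution (cards1 : List String) (cards2 : List String) (goal : List String) : Prop := goal = []
instance (cards1 : List String) (cards2 : List String) (goal : List String) : Decidable (D_solution cards1 cards2 goal) := by unfold D_solution; infer_instance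

def Spec_solution (cards1 : List String) (cards2 : List String) (goal : List String) (out : String) : Prop := ¬ D_solution cards1 cards2 goal → out = solution_alt cards1 cards2 goal
instance (cards1 : List String) (cards2 : List String) (goal : List String) (out : String) : Decidable (Spec_solution cards1 cards2 goal out) := by unfold Spec_solution; infer_instance

def pvDiffWitness_solution : List String × List String × List String := ([], [], [])
def pvDiffWitnessOut_solution : String × String := ("No", "Yes")

-- ===== CLAIM (what is proved, stated in full; the proofs are below) =====
def Claim_unchanged_solution : Prop := ∀ (cards1 : List String) (cards2 : List String) (goal : List String), Dom_solution cards1 cards2 goal → Spec_solution cards1 cards2 goal (solution cards1 cards2 goal)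
def Claim_changed_solution : Prop := Dom_solution (pvDiffWitness_solution.1) (pvDiffWitness_solution.2.1) (pvDiffWitness_solution.2.2) ∧ D_solution (pvDiffWitness_solution.1) (pvDiffWitness_solution.2.1) (pvDiffWitness_solution.2.2) ∧ solution (pvDiffWitness_solution.1) (pvDiffWitness_solution.2.1) (pvDiffWitness_solution.2.2) = pvDiffWitnessOut_solution.1 ∧ solution_alt (pvDiffWitness_solution.1) (pvDiffWitness_solution.2.1) (pvDiffWitness_solution.2.2) = pvDiffWitnessOut_solution.2 ∧ pvDiffWitnessOut_solution.1 ≠ pvDiffWitnessOut_solution.2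
def Claim_exact_solution : Prop := ∀ (cards1 : List String) (cards2 : List String) (goal : List String), Dom_solution cards1 cards2 goal → D_solution cards1 cards2 goal → solution cards1 cards2 goal ≠ solution_alt cards1 cards2 goal

-- ===== LEMMAS AND PROOFS =====

-- once the answer has fallen behind (fewer entries than remaining iterations can append), A returns "No"
lemma solutionGo_off (goal : List String) :
    ∀ (idxs : List Int) (c1 c2 ans : List String),
      ans.length + idxs.length < goal.length →
      solutionGo goal idxs c1 c2 ans = "No" := by
  intro idxs
  induction idxs with
  | nil => intro c1 c2 ans _; rfl
  | cons i rest ih =>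
      intro c1 c2 ans h
      simp only [solutionGo, List.length_cons] at h ⊢
      have key : ∀ st : List String × List String × List String,
          st.2.2.length ≤ ans.length + 1 →
          (if goal = st.2.2 then "Yes" else solutionGo goal rest st.1 st.2.1 st.2.2) = "No" := by
        intro st hst
        rw [if_neg, ih _ _ _ (by omega)]
        intro he; apply_fun List.length at he; omega
      refine key _ ?_
      split_ifs <;> (try simp) <;> omega

lemma main_lemma (cards1 cards2 goal : List String) :
    ∀ (gs : List String) (k i j : Nat),
      gs ≠ [] →
      k + gs.length = goal.length →
      goal.drop k = gs →
      solutionGo goal (PySem.List.pyRange (k : Int) (goal.length : Int) 1)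
          (cards1.drop i) (cards2.drop j) (goal.take k)
        = solutionAltGo cards1 cards2 gs (i : Int) (j : Int) := by
  intro gs
  induction gs with
  | nil => intro k i j hne; exact absurd rfl hne
  | cons g gs' ih =>
      intro k i j _ hlen hdrop
      have hk : k < goal.length := by simp at hlen; omega
      have hgk : goal[k]? = some g := by
        have h0 : (goal.drop k)[0]? = goal[k + 0]? := List.getElem?_drop
        rw [hdrop] at h0; simpa using h0.symm
      rw [PySem.List.pyRange_one_cons (by exact_mod_cast hk)]
      simp only [solutionGo, solutionAltGo]
      have hget : PySem.List.pyGet? goal (k : Int) = some g := by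
        simpa [PySem.List.pyGet?_natCast] using hgk
      have hd1 : PySem.List.pyGet? (cards1.drop i) 0 = cards1[i]? := by
        have h0 : (cards1.drop i)[0]? = cards1[i + 0]? := List.getElem?_drop
        simpa [PySem.List.pyGet?_zero] using h0
      have hd2 : PySem.List.pyGet? (cards2.drop j) 0 = cards2[j]? := by
        have h0 : (cards2.drop j)[0]? = cards2[j + 0]? := List.getElem?_drop
        simpa [PySem.List.pyGet?_zero] using h0
      have hc1 : ((cards1.drop i).length > 0 ∧ PySem.List.pyGet? (cards1.drop i) 0 = PySem.List.pyGet? goal (k : Int))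
          ↔ ((i : Int) < (cards1.length : Int) ∧ PySem.List.pyGet? cards1 (i : Int) = some g) := by
        rw [hget, hd1]
        simp only [PySem.List.pyGet?_natCast, List.length_drop, gt_iff_lt]
        constructor <;> rintro ⟨ha, hb⟩ <;> exact ⟨by omega, hb⟩
      have hc2 : ((cards2.drop j).length > 0 ∧ PySem.List.pyGet? (cards2.drop j) 0 = PySem.List.pyGet? goal (k : Int))
          ↔ ((j : Int) < (cards2.length : Int) ∧ PySem.List.pyGet? cards2 (j : Int) = some g) := by
        rw [hget, hd2]
        simp only [PySem.List.pyGet?_natCast, List.length_drop, gt_iff_lt]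
        constructor <;> rintro ⟨ha, hb⟩ <;> exact ⟨by omega, hb⟩
      have htake : goal.take k ++ [g] = goal.take (k + 1) := by
        rw [List.take_add_one, hgk]; rfl
      by_cases hb1 : ((i : Int) < (cards1.length : Int) ∧ PySem.List.pyGet? cards1 (i : Int) = some g)
      · rw [if_pos (hc1.mpr hb1), if_pos hb1]
        have hv : (PySem.List.pyGet? (cards1.drop i) 0).getD "" = g := by
          rw [hd1]
          have hsome : cards1[i]? = some g := by
            simpa [PySem.List.pyGet?_natCast] using hb1.2
          simp [hsome]
        simp only [hv, htake]
        by_cases hend : gs' = []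
        · subst hend
          have hfull : goal.take (k + 1) = goal := by
            apply List.take_of_length_le; simp at hlen; omega
          rw [hfull]; simp [solutionAltGo]
        · have hne : goal ≠ goal.take (k + 1) := by
            intro he
            apply_fun List.length at he
            rw [List.length_take] at he
            simp at hlen
            exact hend (List.eq_nil_of_length_eq_zero (by omega))
          rw [if_neg (by simpa using hne)]
          have hdrop1 : (cards1.drop i).tail = cards1.drop (i + 1) := by
            rw [List.tail_drop]
          have hgoal1 : goal.drop (k + 1) = gs' := by
            have hdd : List.drop 1 (List.drop k goal) = List.drop (k + 1) goal := List.drop_drop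
            rw [← hdd, hdrop]; rfl
          have hIH := ih (k + 1) (i + 1) j hend (by simp at hlen ⊢; omega) hgoal1
          rw [hdrop1]
          push_cast at hIH ⊢
          exact hIH
      · rw [if_neg (fun h => hb1 (hc1.mp h)), if_neg hb1]
        by_cases hb2 : ((j : Int) < (cards2.length : Int) ∧ PySem.List.pyGet? cards2 (j : Int) = some g)
        · rw [if_pos (hc2.mpr hb2), if_pos hb2]
          have hv : (PySem.List.pyGet? (cards2.drop j) 0).getD "" = g := by
            rw [hd2]
            have hsome : cards2[j]? = some g := by
              simpa [PySem.List.pyGet?_natCast] using hb2.2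
            simp [hsome]
          simp only [hv, htake]
          by_cases hend : gs' = []
          · subst hend
            have hfull : goal.take (k + 1) = goal := by
              apply List.take_of_length_le; simp at hlen; omega
            rw [hfull]; simp [solutionAltGo]
          · have hne : goal ≠ goal.take (k + 1) := by
              intro he
              apply_fun List.length at he
              rw [List.length_take] at he
              simp at hlen
              exact hend (List.eq_nil_of_length_eq_zero (by omega))
            rw [if_neg (by simpa using hne)]
            have hdrop2 : (cards2.drop j).tail = cards2.drop (j + 1) := by
              rw [List.tail_drop]
            have hgoal1 : goal.drop (k + 1) = gs' := by
              have hdd : List.drop 1 (List.drop k goal) = List.drop (k + 1) goal := List.drop_drop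
              rw [← hdd, hdrop]; rfl
            have hIH := ih (k + 1) i (j + 1) hend (by simp at hlen ⊢; omega) hgoal1
            rw [hdrop2]
            push_cast at hIH ⊢
            exact hIH
        · rw [if_neg (fun h => hb2 (hc2.mp h)), if_neg hb2]
          have hne : goal ≠ goal.take k := by
            intro he
            apply_fun List.length at he
            rw [List.length_take] at he
            omega
          rw [if_neg (by simpa using hne)]
          apply solutionGo_off
          rw [PySem.List.length_pyRange_one, List.length_take]
          simp at hlen ⊢
          omega

-- ===== VERDICT (by name: the statement is the Claim_ definition above) =====
theorem solution_spec : Claim_unchanged_solution := by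
  intro cards1 cards2 goal _ hD
  have hne : goal ≠ [] := by simpa [D_solution] using hD
  have h := main_lemma cards1 cards2 goal goal 0 0 0 hne (by simp) (by simp)
  simpa [solution, solution_alt] using h

theorem solution_changed : Claim_changed_solution := by unfold Claim_changed_solution; decide

theorem solution_tight : Claim_exact_solution := by
  intro cards1 cards2 goal _ hD
  have h : goal = [] := hD
  subst h
  simp [solution, solution_alt, solutionAltGo, solutionGo, PySem.List.pyRange_one_eq_nil (le_refl 0)]
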